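-- pv_equiv track=rewrite | github.com/CandiceHines/IndependentStudy | SPACEc/tools/trace_module_guide.py | choose_entry_function
-- ===== SOURCE A (Python) =====
-- from typing import Dict, List, Optional, Tuple
--
-- ENTRY_HINTS = ["run", "normalize", "compensate", "cluster", "infer_cell_types",
--                "neighborhood", "export", "main"]
--
-- def choose_entry_function(funcs: List[Tuple[int, str]], hint: Optional[str]) -> Optional[Tuple[int, str]]:
--     # Priority: hint match, else first in ENTRY_HINTS, else first function
--     names = [name for _, name in funcs]
--     if hint and hint in names:
--         return next((ln, nm) for ln, nm in funcs if nm == hint)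
--     for h in ENTRY_HINTS:
--         if h in names:
--             return next((ln, nm) for ln, nm in funcs if nm == h)
--     return funcs[0] if funcs else None
-- ===== SOURCE B (Python) =====
-- from typing import List, Optional, Tuple
--
-- ENTRY_HINTS = ["run", "normalize", "compensate", "cluster", "infer_cell_types",
--                "neighborhood", "export", "main"]
--
-- def choose_entry_function(funcs: List[Tuple[int, str]], hint: Optional[str]) -> Optional[Tuple[int, str]]:
--     # One scoring pass: lower score = higher priority; Python's min is stable (first minimal wins).
--     if not funcs:
--         return None
--     sentinel = len(ENTRY_HINTS) + 1
--     def prio(name: str) -> int: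
--         if hint and name == hint:
--             return 0
--         if name in ENTRY_HINTS:
--             return 1 + ENTRY_HINTS.index(name)
--         return sentinel
--     return min(funcs, key=lambda e: prio(e[1]))
-- ===== Notes on version B (the rewrite author's own statement) =====
-- stated objective: idiomatic
-- what changed: Replaced A's cascade of membership tests and rescans (hint branch, then a loop over ENTRY_HINTS each with its own scan) by a single numeric priority score per function and one stable min-selection over funcs.
import Mathlib
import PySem

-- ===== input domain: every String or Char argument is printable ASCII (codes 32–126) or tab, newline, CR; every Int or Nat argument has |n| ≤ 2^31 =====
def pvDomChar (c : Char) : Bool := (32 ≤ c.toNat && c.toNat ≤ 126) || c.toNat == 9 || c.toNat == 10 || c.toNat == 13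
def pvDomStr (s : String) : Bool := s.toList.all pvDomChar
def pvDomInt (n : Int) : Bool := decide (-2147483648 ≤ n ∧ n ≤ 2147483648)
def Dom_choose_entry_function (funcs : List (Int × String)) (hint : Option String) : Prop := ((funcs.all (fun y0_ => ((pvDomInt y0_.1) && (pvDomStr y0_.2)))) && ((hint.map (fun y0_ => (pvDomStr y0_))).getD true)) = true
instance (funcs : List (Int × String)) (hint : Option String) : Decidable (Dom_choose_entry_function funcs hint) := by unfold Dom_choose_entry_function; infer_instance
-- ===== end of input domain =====

-- B replaces A's cascaded membership tests + rescans by one priority score per function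
-- and a single stable min-selection (idiomatic; same return value everywhere).

def ENTRY_HINTS : List String := ["run", "normalize", "compensate", "cluster", "infer_cell_types",
                                  "neighborhood", "export", "main"]

-- ===== PORT A =====
-- A's 'for h in ENTRY_HINTS: if h in names: return next(...)' loop, then 'funcs[0] if funcs else None'
def pvHintLoop : List String → List String → List (Int × String) → Option (Int × String)
  | [], _, funcs => funcs.head?
  | h :: t, names, funcs =>
      if names.contains h then funcs.find? (fun p => p.2 == h)
      else pvHintLoop t names funcs

def choose_entry_function (funcs : List (Int × String)) (hint : Option String) : Option (Int × String) :=
  let names : List String := funcs.map (fun p => p.2)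
  match hint with
  | some h =>
      -- 'if hint and hint in names': truthy hint (non-empty string) present among names;
      -- 'next(...)' always succeeds under that guard, so find? returns exactly its value
      if h ≠ "" ∧ names.contains h then funcs.find? (fun p => p.2 == h)
      else pvHintLoop ENTRY_HINTS names funcs
  | none => pvHintLoop ENTRY_HINTS names funcs

-- ===== PORT B =====
-- Source B's prio closure; under the contains-guard Python's list.index equals idxOf
def pvPrio (hint : Option String) (name : String) : Nat :=
  if (match hint with | some h => decide (h ≠ "") && (name == h) | none => false) then 0
  else if ENTRY_HINTS.contains name then 1 + ENTRY_HINTS.idxOf name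
  else ENTRY_HINTS.length + 1

def choose_entry_function_alt (funcs : List (Int × String)) (hint : Option String) : Option (Int × String) :=
  match funcs with
  | [] => none
  | _ => PySem.List.min? funcs (fun e => pvPrio hint e.2)

-- ===== PRECONDITION & SPEC =====
def Spec_choose_entry_function (funcs : List (Int × String)) (hint : Option String) (out : Option (Int × String)) : Prop := out = choose_entry_function_alt funcs hint
instance (funcs : List (Int × String)) (hint : Option String) (out : Option (Int × String)) : Decidable (Spec_choose_entry_function funcs hint out) := by unfold Spec_choose_entry_function; infer_instance

-- ===== CLAIM (what is proved, stated in full; the proofs are below) =====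
def Claim_equal_choose_entry_function : Prop := ∀ (funcs : List (Int × String)) (hint : Option String), Dom_choose_entry_function funcs hint → Spec_choose_entry_function funcs hint (choose_entry_function funcs hint)

-- ===== LEMMAS AND PROOFS =====

-- canonical "first element with minimal key", computed from the right
def pvBest {α : Type} (p : α → Nat) : List α → Option α
  | [] => none
  | x :: t =>
      match pvBest p t with
      | none => some x
      | some m => if p x ≤ p m then some x else some m

theorem pvBest_eq_none {α : Type} (p : α → Nat) (l : List α) : pvBest p l = none ↔ l = [] := by
  cases l with
  | nil => simp [pvBest]
  | cons x t => simp only [pvBest]; cases pvBest p t with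
    | none => simp
    | some m => by_cases h : p x ≤ p m <;> simp [h]

theorem pvBest_mem {α : Type} (p : α → Nat) : ∀ (l : List α) (m : α), pvBest p l = some m → m ∈ l := by
  intro l
  induction l with
  | nil => intro m h; simp [pvBest] at h
  | cons x t ih =>
      intro m h
      simp only [pvBest] at h
      cases hb : pvBest p t with
      | none => rw [hb] at h; simp at h; simp [h]
      | some b =>
          rw [hb] at h
          by_cases hle : p x ≤ p b
          · simp [hle] at h; simp [h]
          · simp [hle] at h; exact List.mem_cons_of_mem _ (h ▸ ih b hb)

theorem pvBest_isMin {α : Type} (p : α → Nat) : ∀ (l : List α) (m : α), pvBest p l = some m → ∀ y ∈ l, p m ≤ p y := by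
  intro l
  induction l with
  | nil => intro m h; simp [pvBest] at h
  | cons x t ih =>
      intro m h y hy
      simp only [pvBest] at h
      cases hb : pvBest p t with
      | none =>
          rw [hb] at h; simp at h
          have ht : t = [] := (pvBest_eq_none p t).mp hb
          subst ht
          simp at hy
          rw [← h, hy]
      | some b =>
          rw [hb] at h
          by_cases hle : p x ≤ p b
          · simp [hle] at h
            rw [← h]
            cases hy with
            | head => exact le_refl _
            | tail _ hyt => exact le_trans hle (ih b hb y hyt)
          · simp [hle] at h
            rw [← h]
            cases hy with
            | head => omega
            | tail _ hyt => exact ih b hb y hyt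

-- PySem.List.min? computes exactly pvBest (strict < keeps the earlier element on ties)
theorem pvFold_eq_best {α : Type} (p : α → Nat) :
    ∀ (t : List α) (x : α),
      List.foldl (fun acc y => match acc with
        | none => some y
        | some m => if p y < p m then some y else some m) (some x) t = pvBest p (x :: t) := by
  intro t
  induction t with
  | nil => intro x; simp [pvBest]
  | cons y t' ih =>
      intro x
      simp only [List.foldl]
      by_cases hyx : p y < p x
      · rw [if_pos hyx, ih y]
        simp only [pvBest]
        cases hb : pvBest p t' with
        | none => simp [Nat.not_le.mpr hyx]
        | some m =>
            by_cases hym : p y ≤ p m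
            · simp [hym, Nat.not_le.mpr hyx]
            · have hmin := pvBest_isMin p t' m hb
              have hxm : ¬ p x ≤ p m := by omega
              simp [hym, hxm]
      · rw [if_neg hyx, ih x]
        have hxy : p x ≤ p y := by omega
        simp only [pvBest]
        cases hb : pvBest p t' with
        | none => simp [hxy]
        | some m =>
            by_cases hym : p y ≤ p m
            · have hxm : p x ≤ p m := le_trans hxy hym
              simp [hym, hxm, hxy]
            · simp only [if_neg hym]

theorem pvMin?_eq_best {α : Type} (p : α → Nat) (l : List α) :
    PySem.List.min? l p = pvBest p l := by
  cases l with
  | nil => rfl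
  | cons x t => simpa [PySem.List.min?, List.foldl] using pvFold_eq_best p t x

-- pvBest depends only on the relative order of keys on members
theorem pvBest_congr {α : Type} (p q : α → Nat) :
    ∀ (l : List α), (∀ a ∈ l, ∀ b ∈ l, (p a ≤ p b ↔ q a ≤ q b)) → pvBest p l = pvBest q l := by
  intro l
  induction l with
  | nil => intro _; rfl
  | cons x t ih =>
      intro h
      have ht : pvBest p t = pvBest q t := ih (fun a ha b hb => h a (List.mem_cons_of_mem _ ha) b (List.mem_cons_of_mem _ hb))
      simp only [pvBest, ht]
      cases hb : pvBest q t with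
      | none => rfl
      | some m =>
          have hm : m ∈ t := pvBest_mem q t m hb
          have hiff := h x List.mem_cons_self m (List.mem_cons_of_mem _ hm)
          dsimp only
          by_cases hxm : q x ≤ q m
          · rw [if_pos hxm, if_pos (hiff.mpr hxm)]
          · rw [if_neg hxm, if_neg (fun hc => hxm (hiff.mp hc))]

-- if the key-0 elements are exactly those satisfying r, and one exists, pvBest is find? r
theorem pvBest_zero {α : Type} (p : α → Nat) (r : α → Bool) :
    ∀ (l : List α), (∀ e ∈ l, (p e = 0 ↔ r e = true)) → (∃ e ∈ l, r e = true) →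
      pvBest p l = l.find? r := by
  intro l
  induction l with
  | nil => intro _ hex; simp at hex
  | cons x t ih =>
      intro h hex
      by_cases hrx : r x = true
      · have hx0 : p x = 0 := (h x List.mem_cons_self).mpr hrx
        simp only [pvBest, List.find?, hrx]
        cases hb : pvBest p t with
        | none => rfl
        | some m => simp [hx0]
      · have hex' : ∃ e ∈ t, r e = true := by
          rcases hex with ⟨e, he, hre⟩
          cases he with
          | head => exact absurd hre hrx
          | tail _ het => exact ⟨e, het, hre⟩
        have ht := ih (fun e he => h e (List.mem_cons_of_mem _ he)) hex'
        cases hf : t.find? r with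
        | none =>
            exfalso
            rcases hex' with ⟨e, he, hre⟩
            exact absurd hre (by simpa using List.find?_eq_none.mp hf e he)
        | some e' =>
            have hre' := List.find?_some hf
            have hme' := List.mem_of_find?_eq_some hf
            have h0 : p e' = 0 := (h e' (List.mem_cons_of_mem _ hme')).mpr hre'
            have hx0 : p x ≠ 0 := fun hc => hrx ((h x List.mem_cons_self).mp hc)
            have hxe : ¬ p x ≤ p e' := by omega
            simp only [pvBest, ht, hf, List.find?, hrx]
            simp [hxe]

-- constant key: pvBest is head?
theorem pvBest_const {α : Type} (c : Nat) : ∀ (l : List α), pvBest (fun _ => c) l = l.head? := by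
  intro l
  induction l with
  | nil => rfl
  | cons x t ih => simp only [pvBest, ih]; cases t <;> simp

-- key of A's hints loop
def pvPrioH (H : List String) (name : String) : Nat :=
  if H.contains name then H.idxOf name else H.length

theorem pvPrioH_zero (h : String) (t : List String) (name : String) :
    pvPrioH (h :: t) name = 0 ↔ name = h := by
  unfold pvPrioH
  by_cases hn : name = h
  · subst hn
    simp
  · constructor
    · intro h0
      by_cases hc : (h :: t).contains name
      · rw [if_pos hc] at h0
        rw [List.idxOf_cons] at h0
        have : (h == name) = false := by simp [Ne.symm hn]
        simp [this] at h0
      · rw [if_neg hc] at h0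
        simp at h0
    · intro hc; exact absurd hc hn

theorem pvPrioH_shift (h : String) (t : List String) (name : String) (hne : name ≠ h) :
    pvPrioH (h :: t) name = 1 + pvPrioH t name := by
  unfold pvPrioH
  have hbeq : (h == name) = false := by simp [Ne.symm hne]
  by_cases hc : t.contains name
  · have hc2 : (h :: t).contains name = true := by simp_all
    rw [if_pos hc2, if_pos hc, List.idxOf_cons]
    simp [hbeq]
    omega
  · have hc2 : ¬ (h :: t).contains name = true := by
      simp at hc ⊢
      exact ⟨hne, hc⟩
    rw [if_neg hc2, if_neg hc]
    simp [Nat.add_comm]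

theorem pvHintLoop_eq_best (funcs : List (Int × String)) :
    ∀ (H : List String),
      pvHintLoop H (funcs.map (fun p => p.2)) funcs = pvBest (fun e => pvPrioH H e.2) funcs := by
  intro H
  induction H with
  | nil =>
      simp only [pvHintLoop]
      have : (fun e : Int × String => pvPrioH [] e.2) = (fun _ : Int × String => 0) := by
        funext e; simp [pvPrioH]
      rw [this]
      exact (pvBest_const 0 funcs).symm
  | cons h t ih =>
      simp only [pvHintLoop]
      by_cases hc : ((funcs.map (fun p => p.2)).contains h : Bool) = true
      · rw [if_pos hc]
        have hex : ∃ e ∈ funcs, (e.2 == h) = true := by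
          rcases List.contains_iff_exists_mem_beq.mp hc with ⟨nm, hnm, hbeq⟩
          rcases List.mem_map.mp hnm with ⟨e, he, hee⟩
          have hnmh : nm = h := (beq_iff_eq.mp hbeq).symm
          exact ⟨e, he, by simp [hee, hnmh]⟩
        rw [← pvBest_zero _ (fun p => p.2 == h) funcs (fun e _ => by
          constructor
          · intro h0
            have := (pvPrioH_zero h t e.2).mp h0
            simp [this]
          · intro hr
            exact (pvPrioH_zero h t e.2).mpr (by simpa using hr)) hex]
      · rw [if_neg hc]
        rw [ih]
        apply pvBest_congr
        intro a ha b hb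
        have hshift : ∀ e ∈ funcs, pvPrioH (h :: t) e.2 = 1 + pvPrioH t e.2 := by
          intro e he
          apply pvPrioH_shift
          intro hc2
          apply hc
          exact List.contains_iff_exists_mem_beq.mpr ⟨e.2, List.mem_map_of_mem he, by simp [hc2]⟩
        rw [hshift a ha, hshift b hb]
        omega

-- guard of Source B's prio is false ⇒ pvPrio is a shift of pvPrioH ENTRY_HINTS
theorem pvPrio_shift (hint : Option String) (name : String)
    (hg : (match hint with | some h => decide (h ≠ "") && (name == h) | none => false) = false) :
    pvPrio hint name = 1 + pvPrioH ENTRY_HINTS name := by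
  unfold pvPrio pvPrioH
  rw [hg]
  simp only [Bool.false_eq_true, if_false]
  by_cases hc : (ENTRY_HINTS.contains name) = true
  · rw [if_pos hc, if_pos hc]
  · rw [if_neg hc, if_neg hc]
    exact Nat.add_comm _ 1

theorem pvAlt_eq_best (funcs : List (Int × String)) (hint : Option String) :
    choose_entry_function_alt funcs hint = pvBest (fun e => pvPrio hint e.2) funcs := by
  cases funcs with
  | nil => rfl
  | cons x t =>
      simp only [choose_entry_function_alt]
      exact pvMin?_eq_best _ _

theorem pvA_eq_best (funcs : List (Int × String)) (hint : Option String) :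
    choose_entry_function funcs hint = pvBest (fun e => pvPrio hint e.2) funcs := by
  cases hint with
  | none =>
      simp only [choose_entry_function]
      rw [pvHintLoop_eq_best]
      apply pvBest_congr
      intro a ha b hb
      rw [pvPrio_shift none a.2 rfl, pvPrio_shift none b.2 rfl]
      omega
  | some h =>
      simp only [choose_entry_function]
      by_cases hg : h ≠ "" ∧ ((funcs.map (fun p => p.2)).contains h : Bool) = true
      · rw [if_pos hg]
        have hex : ∃ e ∈ funcs, (e.2 == h) = true := by
          rcases List.contains_iff_exists_mem_beq.mp hg.2 with ⟨nm, hnm, hbeq⟩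
          rcases List.mem_map.mp hnm with ⟨e, he, hee⟩
          have hnmh : nm = h := (beq_iff_eq.mp hbeq).symm
          exact ⟨e, he, by simp [hee, hnmh]⟩
        rw [← pvBest_zero (fun e => pvPrio (some h) e.2) (fun p => p.2 == h) funcs (fun e _ => by
          unfold pvPrio
          by_cases heq : e.2 = h
          · simp [heq, hg.1]
          · have hb1 : (e.2 == h) = false := by simp [heq]
            simp only [hb1, Bool.and_false, if_false, Bool.false_eq_true]
            constructor
            · intro h0
              split at h0 <;> simp_all
            · intro hr
              simp at hr) hex]
      · rw [if_neg hg]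
        rw [pvHintLoop_eq_best]
        apply pvBest_congr
        intro a ha b hb
        have hgf : ∀ e ∈ funcs, (decide (h ≠ "") && (e.2 == h)) = false := by
          intro e he
          by_cases hh : h = ""
          · simp [hh]
          · have : e.2 ≠ h := by
              intro hc2
              exact hg ⟨hh, List.contains_iff_exists_mem_beq.mpr ⟨e.2, List.mem_map_of_mem he, by simp [hc2]⟩⟩
            simp [this]
        rw [pvPrio_shift (some h) a.2 (hgf a ha), pvPrio_shift (some h) b.2 (hgf b hb)]
        omega

-- ===== VERDICT (by name: the statement is the Claim_ definition above) =====
theorem choose_entry_function_spec : Claim_equal_choose_entry_function := by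
  intro funcs hint _
  unfold Spec_choose_entry_function
  rw [pvA_eq_best, pvAlt_eq_best]
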